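-- pv_equiv track=rewrite | github.com/PyeongGang-Kim/TIL | algorithm/라인/1.py | solution
-- ===== SOURCE A (Python) =====
-- def solution(inputString):
--     cl = [0, 0, 0, 0]
--     cnt = 0
--     D = {
--             "(": (0, 1), ")": (0, -1),
--             "{": (1, 1), "}": (1, -1),
--             "[": (2, 1), "]": (2, -1),
--             "<": (3, 1), ">": (3, -1),
--          }
--     for char in inputString:
--         tmp = D.get(char)
--         if tmp:
--             cl[tmp[0]] += tmp[1]
--             if cl[tmp[0]] < 0:
--                 return -1
--             if tmp[1] == -1:
--                 cnt += 1
--     if sum(cl):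
--         return -1
--     answer = cnt
--     return answer
-- ===== SOURCE B (Python) =====
-- def solution(inputString):
--     # Validate each bracket type independently with its own running balance,
--     # then return the total number of closing brackets.
--     total = 0
--     for opener, closer in (("(", ")"), ("{", "}"), ("[", "]"), ("<", ">")):
--         balance = 0
--         seen = 0
--         for char in inputString:
--             if char == opener:
--                 balance += 1
--             elif char == closer:
--                 balance -= 1
--                 seen += 1
--                 if balance < 0:
--                     return -1
--         if balance != 0:
--             return -1
--         total += seen
--     return total
-- ===== Notes on version B (the rewrite author's own statement) =====
-- stated objective: alternative
-- what changed: Replaces the single fused dict-driven pass with four independent per-bracket-type balance scans (no dict, no 4-slot counter list), each validating one pair and counting its closers; totals are summed at the end.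
import Mathlib
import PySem

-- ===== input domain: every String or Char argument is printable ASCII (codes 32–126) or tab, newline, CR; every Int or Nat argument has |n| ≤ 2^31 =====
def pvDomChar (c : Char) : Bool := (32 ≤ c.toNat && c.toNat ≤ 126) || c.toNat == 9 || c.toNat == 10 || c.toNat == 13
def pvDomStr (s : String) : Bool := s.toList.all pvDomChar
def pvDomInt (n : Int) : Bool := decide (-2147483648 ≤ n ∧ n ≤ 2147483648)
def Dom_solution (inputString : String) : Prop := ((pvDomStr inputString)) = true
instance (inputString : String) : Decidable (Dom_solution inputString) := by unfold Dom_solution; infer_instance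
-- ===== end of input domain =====

-- B replaces A's single fused dict-driven pass (4-slot counter list + bracket dict) by four
-- independent per-bracket-type balance scans; same result, alternative decomposition (no speed claim).

-- ===== PORT A =====
-- the dict D of A
def solDict : PySem.Dict Char (Nat × Int) :=
  PySem.Dict.ofList [('(', (0, 1)), (')', (0, -1)), ('{', (1, 1)), ('}', (1, -1)),
                     ('[', (2, 1)), (']', (2, -1)), ('<', (3, 1)), ('>', (3, -1))]

-- A's single for-loop over the string, carrying the counter list `cl` and `cnt`;
-- early `return -1` is the -1 branches.
def aLoop : List Char → List Int → Int → Int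
  | [], cl, cnt => if cl.sum ≠ 0 then -1 else cnt
  | ch :: rest, cl, cnt =>
    match solDict.get? ch with
    | none => aLoop rest cl cnt
    | some tmp =>
      let cl' := cl.set tmp.1 (cl.getD tmp.1 0 + tmp.2)
      if cl'.getD tmp.1 0 < 0 then -1
      else aLoop rest cl' (if tmp.2 = -1 then cnt + 1 else cnt)

def solution (inputString : String) : Int :=
  aLoop inputString.toList [0, 0, 0, 0] 0

-- ===== PORT B =====
-- B's inner loop for one (opener, closer) pair: running balance and closer count;
-- `none` is B's early `return -1` (balance went negative).
def bScan : List Char → Char → Char → Int → Int → Option (Int × Int)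
  | [], _, _, bal, seen => some (bal, seen)
  | ch :: rest, o, c, bal, seen =>
    if ch = o then bScan rest o c (bal + 1) seen
    else if ch = c then
      if bal - 1 < 0 then none else bScan rest o c (bal - 1) (seen + 1)
    else bScan rest o c bal seen

-- B's outer loop over the four pairs, accumulating `total`.
def bLoop (s : List Char) : List (Char × Char) → Int → Int
  | [], total => total
  | (o, c) :: ps, total =>
    match bScan s o c 0 0 with
    | none => -1
    | some (bal, seen) => if bal ≠ 0 then -1 else bLoop s ps (total + seen)

def solution_alt (inputString : String) : Int :=
  bLoop inputString.toList [('(', ')'), ('{', '}'), ('[', ']'), ('<', '>')] 0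

-- ===== PRECONDITION & SPEC =====
def Spec_solution (inputString : String) (out : Int) : Prop := out = solution_alt inputString
instance (inputString : String) (out : Int) : Decidable (Spec_solution inputString out) := by unfold Spec_solution; infer_instance

-- ===== CLAIM (what is proved, stated in full; the proofs are below) =====
def Claim_equal_solution : Prop := ∀ (inputString : String), Dom_solution inputString → Spec_solution inputString (solution inputString)

-- ===== LEMMAS AND PROOFS =====

-- number of closing brackets in s (what A's `cnt` totals on a successful run)
def closersCount : List Char → Int
  | [] => 0
  | ch :: rest => (if ch = ')' ∨ ch = '}' ∨ ch = ']' ∨ ch = '>' then 1 else 0) + closersCount rest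

-- combine the four per-type final balances into A's result shape
def comb (o1 o2 o3 o4 : Option Int) (cnt k : Int) : Int :=
  match o1, o2, o3, o4 with
  | some x, some y, some z, some w => if x + y + z + w ≠ 0 then -1 else cnt + k
  | _, _, _, _ => -1

theorem comb_shift_one (o1 o2 o3 o4 : Option Int) (cnt k : Int) :
    comb o1 o2 o3 o4 cnt (1 + k) = comb o1 o2 o3 o4 (cnt + 1) k := by
  rcases o1 with _ | x <;> rcases o2 with _ | y <;> rcases o3 with _ | z <;>
    rcases o4 with _ | w <;> (simp [comb]; try (split <;> omega))

-- the final balance of a scan does not depend on the starting `seen`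
theorem bScan_fst (s : List Char) (o c : Char) (bal seen : Int) :
    (bScan s o c bal seen).map (·.1) = (bScan s o c bal 0).map (·.1) := by
  induction s generalizing bal seen with
  | nil => simp [bScan]
  | cons ch rest ih =>
    simp only [bScan]
    split
    · exact ih _ _
    · split
      · split
        · rfl
        · rw [ih _ (seen + 1), ih _ (0 + 1)]
      · exact ih _ _

-- a completed scan has a nonnegative final balance (if it started nonnegative)
theorem bScan_nonneg (s : List Char) (o c : Char) (bal seen b m : Int)
    (h : bScan s o c bal seen = some (b, m)) (hbal : 0 ≤ bal) : 0 ≤ b := by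
  induction s generalizing bal seen with
  | nil => simp [bScan] at h; omega
  | cons ch rest ih =>
    simp only [bScan] at h
    split at h
    · exact ih _ _ h (by omega)
    · split at h
      · split at h
        · exact absurd h (by simp)
        · exact ih _ _ h (by omega)
      · exact ih _ _ h hbal

-- a completed scan's `seen` is the starting `seen` plus the number of closers in s
theorem bScan_seen (s : List Char) (o c : Char) (bal seen b m : Int)
    (hoc : o ≠ c) (h : bScan s o c bal seen = some (b, m)) :
    m = seen + (s.count c : Int) := by
  induction s generalizing bal seen with
  | nil => simp [bScan] at h; simp [h]
  | cons ch rest ih =>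
    simp only [bScan] at h
    rw [List.count_cons]
    split at h
    · rename_i hch
      rw [if_neg (by subst hch; simpa [beq_iff_eq] using hoc)]
      simpa using ih _ _ h
    · split at h
      · rename_i hch
        split at h
        · exact absurd h (by simp)
        · rw [if_pos (by subst hch; simp)]
          have := ih _ _ h
          push_cast at this ⊢
          omega
      · rename_i _ hch
        rw [if_neg (by simpa [beq_iff_eq] using hch)]
        simpa using ih _ _ h

-- the total number of closers splits into the four per-type counts
theorem closersCount_eq (s : List Char) :
    closersCount s = (s.count ')' : Int) + (s.count '}' : Int)
      + (s.count ']' : Int) + (s.count '>' : Int) := by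
  induction s with
  | nil => simp [closersCount]
  | cons ch rest ih =>
    simp only [closersCount, List.count_cons, ih]
    by_cases h1 : ch = ')' <;> by_cases h2 : ch = '}' <;> by_cases h3 : ch = ']' <;>
      by_cases h4 : ch = '>' <;> simp [h1, h2, h3, h4] <;> omega

-- MAIN INVARIANT: A's fused pass equals the combination of the four independent scans
theorem aLoop_eq_comb (s : List Char) (a b c d cnt : Int)
    (ha : 0 ≤ a) (hb : 0 ≤ b) (hc : 0 ≤ c) (hd : 0 ≤ d) :
    aLoop s [a, b, c, d] cnt =
      comb ((bScan s '(' ')' a 0).map (·.1)) ((bScan s '{' '}' b 0).map (·.1))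
           ((bScan s '[' ']' c 0).map (·.1)) ((bScan s '<' '>' d 0).map (·.1))
           cnt (closersCount s) := by
  induction s generalizing a b c d cnt with
  | nil =>
    simp only [aLoop, bScan, comb, closersCount, List.sum_cons, List.sum_nil, Option.map_some]
    split <;> split <;> omega
  | cons ch rest ih =>
    by_cases hK : ch = '('
    ·
      subst hK
      have hD : solDict.get? '(' = some (0, 1) := by decide
      have hgd : [a, b, c, d].getD 0 0 = a := rfl
      have hs1 : bScan ('(' :: rest) '(' ')' a 0 = bScan rest '(' ')' (a + 1) 0 := rfl
      have hs2 : bScan ('(' :: rest) '{' '}' b 0 = bScan rest '{' '}' b 0 := rfl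
      have hs3 : bScan ('(' :: rest) '[' ']' c 0 = bScan rest '[' ']' c 0 := rfl
      have hs4 : bScan ('(' :: rest) '<' '>' d 0 = bScan rest '<' '>' d 0 := rfl
      have hcl : closersCount ('(' :: rest) = closersCount rest := by simp [closersCount]
      simp only [aLoop, hD, hgd, hs1, hs2, hs3, hs4, hcl]
      rw [show List.set [a, b, c, d] 0 (a + 1) = [a + 1, b, c, d] from rfl,
          show ([a + 1, b, c, d] : List Int).getD 0 0 = a + 1 from rfl]
      rw [if_neg (by omega : ¬ a + 1 < 0), if_neg (show ¬(1 : Int) = -1 by decide)]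
      exact ih (a + 1) b c d cnt (by omega) hb hc hd
    by_cases hK : ch = ')'
    ·
      subst hK
      have hD : solDict.get? ')' = some (0, -1) := by decide
      have hgd : [a, b, c, d].getD 0 0 = a := rfl
      have hs1 : bScan (')' :: rest) '(' ')' a 0 = if a - 1 < 0 then none else bScan rest '(' ')' (a - 1) (0 + 1) := rfl
      have hs2 : bScan (')' :: rest) '{' '}' b 0 = bScan rest '{' '}' b 0 := rfl
      have hs3 : bScan (')' :: rest) '[' ']' c 0 = bScan rest '[' ']' c 0 := rfl
      have hs4 : bScan (')' :: rest) '<' '>' d 0 = bScan rest '<' '>' d 0 := rfl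
      have hcl : closersCount (')' :: rest) = 1 + closersCount rest := by simp [closersCount]
      simp only [aLoop, hD, hgd, hs1, hs2, hs3, hs4, hcl]
      rw [show a + -1 = a - 1 from by ring]
      rw [show List.set [a, b, c, d] 0 (a - 1) = [a - 1, b, c, d] from rfl,
          show ([a - 1, b, c, d] : List Int).getD 0 0 = a - 1 from rfl]
      by_cases hneg : a - 1 < 0
      · rw [if_pos hneg, if_pos hneg]
        simp [comb]
      · have hneg2 : 0 ≤ a - 1 := by omega
        rw [if_neg hneg, if_neg hneg]
        rw [if_pos trivial]
        rw [bScan_fst rest '(' ')' (a - 1) (0 + 1)]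
        rw [comb_shift_one]
        exact ih (a - 1) b c d (cnt + 1) hneg2 hb hc hd
    by_cases hK : ch = '{'
    ·
      subst hK
      have hD : solDict.get? '{' = some (1, 1) := by decide
      have hgd : [a, b, c, d].getD 1 0 = b := rfl
      have hs1 : bScan ('{' :: rest) '(' ')' a 0 = bScan rest '(' ')' a 0 := rfl
      have hs2 : bScan ('{' :: rest) '{' '}' b 0 = bScan rest '{' '}' (b + 1) 0 := rfl
      have hs3 : bScan ('{' :: rest) '[' ']' c 0 = bScan rest '[' ']' c 0 := rfl
      have hs4 : bScan ('{' :: rest) '<' '>' d 0 = bScan rest '<' '>' d 0 := rfl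
      have hcl : closersCount ('{' :: rest) = closersCount rest := by simp [closersCount]
      simp only [aLoop, hD, hgd, hs1, hs2, hs3, hs4, hcl]
      rw [show List.set [a, b, c, d] 1 (b + 1) = [a, b + 1, c, d] from rfl,
          show ([a, b + 1, c, d] : List Int).getD 1 0 = b + 1 from rfl]
      rw [if_neg (by omega : ¬ b + 1 < 0), if_neg (show ¬(1 : Int) = -1 by decide)]
      exact ih a (b + 1) c d cnt ha (by omega) hc hd
    by_cases hK : ch = '}'
    ·
      subst hK
      have hD : solDict.get? '}' = some (1, -1) := by decide
      have hgd : [a, b, c, d].getD 1 0 = b := rfl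
      have hs1 : bScan ('}' :: rest) '(' ')' a 0 = bScan rest '(' ')' a 0 := rfl
      have hs2 : bScan ('}' :: rest) '{' '}' b 0 = if b - 1 < 0 then none else bScan rest '{' '}' (b - 1) (0 + 1) := rfl
      have hs3 : bScan ('}' :: rest) '[' ']' c 0 = bScan rest '[' ']' c 0 := rfl
      have hs4 : bScan ('}' :: rest) '<' '>' d 0 = bScan rest '<' '>' d 0 := rfl
      have hcl : closersCount ('}' :: rest) = 1 + closersCount rest := by simp [closersCount]
      simp only [aLoop, hD, hgd, hs1, hs2, hs3, hs4, hcl]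
      rw [show b + -1 = b - 1 from by ring]
      rw [show List.set [a, b, c, d] 1 (b - 1) = [a, b - 1, c, d] from rfl,
          show ([a, b - 1, c, d] : List Int).getD 1 0 = b - 1 from rfl]
      by_cases hneg : b - 1 < 0
      · rw [if_pos hneg, if_pos hneg]
        simp [comb]
      · have hneg2 : 0 ≤ b - 1 := by omega
        rw [if_neg hneg, if_neg hneg]
        rw [if_pos trivial]
        rw [bScan_fst rest '{' '}' (b - 1) (0 + 1)]
        rw [comb_shift_one]
        exact ih a (b - 1) c d (cnt + 1) ha hneg2 hc hd
    by_cases hK : ch = '['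
    ·
      subst hK
      have hD : solDict.get? '[' = some (2, 1) := by decide
      have hgd : [a, b, c, d].getD 2 0 = c := rfl
      have hs1 : bScan ('[' :: rest) '(' ')' a 0 = bScan rest '(' ')' a 0 := rfl
      have hs2 : bScan ('[' :: rest) '{' '}' b 0 = bScan rest '{' '}' b 0 := rfl
      have hs3 : bScan ('[' :: rest) '[' ']' c 0 = bScan rest '[' ']' (c + 1) 0 := rfl
      have hs4 : bScan ('[' :: rest) '<' '>' d 0 = bScan rest '<' '>' d 0 := rfl
      have hcl : closersCount ('[' :: rest) = closersCount rest := by simp [closersCount]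
      simp only [aLoop, hD, hgd, hs1, hs2, hs3, hs4, hcl]
      rw [show List.set [a, b, c, d] 2 (c + 1) = [a, b, c + 1, d] from rfl,
          show ([a, b, c + 1, d] : List Int).getD 2 0 = c + 1 from rfl]
      rw [if_neg (by omega : ¬ c + 1 < 0), if_neg (show ¬(1 : Int) = -1 by decide)]
      exact ih a b (c + 1) d cnt ha hb (by omega) hd
    by_cases hK : ch = ']'
    ·
      subst hK
      have hD : solDict.get? ']' = some (2, -1) := by decide
      have hgd : [a, b, c, d].getD 2 0 = c := rfl
      have hs1 : bScan (']' :: rest) '(' ')' a 0 = bScan rest '(' ')' a 0 := rfl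
      have hs2 : bScan (']' :: rest) '{' '}' b 0 = bScan rest '{' '}' b 0 := rfl
      have hs3 : bScan (']' :: rest) '[' ']' c 0 = if c - 1 < 0 then none else bScan rest '[' ']' (c - 1) (0 + 1) := rfl
      have hs4 : bScan (']' :: rest) '<' '>' d 0 = bScan rest '<' '>' d 0 := rfl
      have hcl : closersCount (']' :: rest) = 1 + closersCount rest := by simp [closersCount]
      simp only [aLoop, hD, hgd, hs1, hs2, hs3, hs4, hcl]
      rw [show c + -1 = c - 1 from by ring]
      rw [show List.set [a, b, c, d] 2 (c - 1) = [a, b, c - 1, d] from rfl,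
          show ([a, b, c - 1, d] : List Int).getD 2 0 = c - 1 from rfl]
      by_cases hneg : c - 1 < 0
      · rw [if_pos hneg, if_pos hneg]
        simp [comb]
      · have hneg2 : 0 ≤ c - 1 := by omega
        rw [if_neg hneg, if_neg hneg]
        rw [if_pos trivial]
        rw [bScan_fst rest '[' ']' (c - 1) (0 + 1)]
        rw [comb_shift_one]
        exact ih a b (c - 1) d (cnt + 1) ha hb hneg2 hd
    by_cases hK : ch = '<'
    ·
      subst hK
      have hD : solDict.get? '<' = some (3, 1) := by decide
      have hgd : [a, b, c, d].getD 3 0 = d := rfl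
      have hs1 : bScan ('<' :: rest) '(' ')' a 0 = bScan rest '(' ')' a 0 := rfl
      have hs2 : bScan ('<' :: rest) '{' '}' b 0 = bScan rest '{' '}' b 0 := rfl
      have hs3 : bScan ('<' :: rest) '[' ']' c 0 = bScan rest '[' ']' c 0 := rfl
      have hs4 : bScan ('<' :: rest) '<' '>' d 0 = bScan rest '<' '>' (d + 1) 0 := rfl
      have hcl : closersCount ('<' :: rest) = closersCount rest := by simp [closersCount]
      simp only [aLoop, hD, hgd, hs1, hs2, hs3, hs4, hcl]
      rw [show List.set [a, b, c, d] 3 (d + 1) = [a, b, c, d + 1] from rfl,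
          show ([a, b, c, d + 1] : List Int).getD 3 0 = d + 1 from rfl]
      rw [if_neg (by omega : ¬ d + 1 < 0), if_neg (show ¬(1 : Int) = -1 by decide)]
      exact ih a b c (d + 1) cnt ha hb hc (by omega)
    by_cases hK : ch = '>'
    ·
      subst hK
      have hD : solDict.get? '>' = some (3, -1) := by decide
      have hgd : [a, b, c, d].getD 3 0 = d := rfl
      have hs1 : bScan ('>' :: rest) '(' ')' a 0 = bScan rest '(' ')' a 0 := rfl
      have hs2 : bScan ('>' :: rest) '{' '}' b 0 = bScan rest '{' '}' b 0 := rfl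
      have hs3 : bScan ('>' :: rest) '[' ']' c 0 = bScan rest '[' ']' c 0 := rfl
      have hs4 : bScan ('>' :: rest) '<' '>' d 0 = if d - 1 < 0 then none else bScan rest '<' '>' (d - 1) (0 + 1) := rfl
      have hcl : closersCount ('>' :: rest) = 1 + closersCount rest := by simp [closersCount]
      simp only [aLoop, hD, hgd, hs1, hs2, hs3, hs4, hcl]
      rw [show d + -1 = d - 1 from by ring]
      rw [show List.set [a, b, c, d] 3 (d - 1) = [a, b, c, d - 1] from rfl,
          show ([a, b, c, d - 1] : List Int).getD 3 0 = d - 1 from rfl]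
      by_cases hneg : d - 1 < 0
      · rw [if_pos hneg, if_pos hneg]
        simp [comb]
      · have hneg2 : 0 ≤ d - 1 := by omega
        rw [if_neg hneg, if_neg hneg]
        rw [if_pos trivial]
        rw [bScan_fst rest '<' '>' (d - 1) (0 + 1)]
        rw [comb_shift_one]
        exact ih a b c (d - 1) (cnt + 1) ha hb hc hneg2
    -- ch is not a bracket at all
    have hD : solDict.get? ch = none := by
      rw [PySem.Dict.get?_eq_none_iff_not_mem_keys]
      have hk : solDict.keys = ['(', ')', '{', '}', '[', ']', '<', '>'] := by decide
      rw [hk]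
      simp [*]
    simp only [aLoop, hD, bScan, closersCount, if_neg ‹¬ch = '('›, if_neg ‹¬ch = ')'›,
      if_neg ‹¬ch = '{'›, if_neg ‹¬ch = '}'›, if_neg ‹¬ch = '['›, if_neg ‹¬ch = ']'›,
      if_neg ‹¬ch = '<'›, if_neg ‹¬ch = '>'›]
    rw [if_neg (by simp [*]), zero_add]
    exact ih a b c d cnt ha hb hc hd

-- ===== VERDICT (by name: the statement is the Claim_ definition above) =====
theorem solution_spec : Claim_equal_solution := by
  intro s _
  unfold Spec_solution solution solution_alt
  rw [aLoop_eq_comb s.toList 0 0 0 0 0 le_rfl le_rfl le_rfl le_rfl]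
  rcases hp : bScan s.toList '(' ')' 0 0 with _ | ⟨x, m1⟩
  · simp only [bLoop, hp, Option.map_none, comb]
  rcases hq : bScan s.toList '{' '}' 0 0 with _ | ⟨y, m2⟩
  · simp only [bLoop, hp, hq, Option.map_none, Option.map_some, comb]
    split <;> rfl
  rcases hr : bScan s.toList '[' ']' 0 0 with _ | ⟨z, m3⟩
  · simp only [bLoop, hp, hq, hr, Option.map_none, Option.map_some, comb]
    split <;> (try split) <;> rfl
  rcases ht : bScan s.toList '<' '>' 0 0 with _ | ⟨w, m4⟩
  · simp only [bLoop, hp, hq, hr, ht, Option.map_none, Option.map_some, comb]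
    split <;> (try split) <;> (try split) <;> rfl
  have hx := bScan_nonneg s.toList '(' ')' 0 0 x m1 hp le_rfl
  have hy := bScan_nonneg s.toList '{' '}' 0 0 y m2 hq le_rfl
  have hz := bScan_nonneg s.toList '[' ']' 0 0 z m3 hr le_rfl
  have hw := bScan_nonneg s.toList '<' '>' 0 0 w m4 ht le_rfl
  have e1 := bScan_seen s.toList '(' ')' 0 0 x m1 (by decide) hp
  have e2 := bScan_seen s.toList '{' '}' 0 0 y m2 (by decide) hq
  have e3 := bScan_seen s.toList '[' ']' 0 0 z m3 (by decide) hr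
  have e4 := bScan_seen s.toList '<' '>' 0 0 w m4 (by decide) ht
  rw [closersCount_eq]
  simp only [bLoop, hp, hq, hr, ht, Option.map_some, comb]
  split_ifs <;> omega
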